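-- pv_equiv track=rewrite | github.com/andriy-pro/audit-friendly-bingo-generator | src/bingo_gen/constraints.py | check_card_distances
-- ===== SOURCE A (Python) =====
-- from typing import List
--
-- def check_row_internal_distance(row: List[int], min_distance: int) -> bool:
--     """Check distances between all pairs in a single row.
--
--     Returns True if all pairs satisfy min_distance, False otherwise.
--     """
--     if min_distance <= 0:
--         return True
--
--     for i in range(len(row)):
--         for j in range(i + 1, len(row)):
--             if abs(row[i] - row[j]) < min_distance:
--                 return False
--     return True
--
-- def check_inter_row_distances(matrix: List[List[int]], min_distance: int) -> bool:
--     """Check distances between all pairs across different rows.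
--
--     Returns True if all pairs satisfy min_distance, False otherwise.
--     """
--     if min_distance <= 0:
--         return True
--
--     for row1_idx in range(len(matrix)):
--         for row2_idx in range(row1_idx + 1, len(matrix)):
--             for num1 in matrix[row1_idx]:
--                 for num2 in matrix[row2_idx]:
--                     if abs(num1 - num2) < min_distance:
--                         return False
--     return True
--
-- def check_card_distances(matrix: List[List[int]], min_distance: int) -> tuple[bool, int]:
--     """Check both intra-row and inter-row distances.
--
--     Returns (is_valid, total_violations).
--     """
--     if min_distance <= 0:
--         return True, 0
--
--     violations = 0
--
--     # Check intra-row distances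
--     for row in matrix:
--         if not check_row_internal_distance(row, min_distance):
--             violations += 1
--
--     # Check inter-row distances
--     if not check_inter_row_distances(matrix, min_distance):
--         violations += 1
--
--     return violations == 0, violations
-- ===== SOURCE B (Python) =====
-- from typing import List
--
-- def check_card_distances(matrix: List[List[int]], min_distance: int) -> tuple[bool, int]:
--     """Sort-based check instead of comparing all pairs.
--
--     A row violates iff some ADJACENT pair of its sorted values is closer than
--     min_distance; a cross-row violation exists iff in the value-sorted list of
--     (value, row_index) tags some adjacent pair has different tags and is closer
--     than min_distance.
--     """
--     if min_distance <= 0: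
--         return True, 0
--
--     violations = 0
--     for row in matrix:
--         s = sorted(row)
--         if any(b - a < min_distance for a, b in zip(s, s[1:])):
--             violations += 1
--
--     tagged = sorted(((v, i) for i, row in enumerate(matrix) for v in row),
--                     key=lambda t: t[0])
--     if any(b[1] != a[1] and b[0] - a[0] < min_distance
--            for a, b in zip(tagged, tagged[1:])):
--         violations += 1
--
--     return violations == 0, violations
-- ===== Notes on version B (the rewrite author's own statement) =====
-- stated objective: alternative
-- what changed: Replaces the all-pairs scans (nested index loops within each row and the quadruple loop across rows) by sorting: each row is sorted and only adjacent gaps are checked, and cross-row closeness is detected on one value-sorted list of (value, row_index) tags by checking adjacent pairs with different row tags; it trades A's early exit on the first close pair for single sorted passes.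
import Mathlib
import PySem

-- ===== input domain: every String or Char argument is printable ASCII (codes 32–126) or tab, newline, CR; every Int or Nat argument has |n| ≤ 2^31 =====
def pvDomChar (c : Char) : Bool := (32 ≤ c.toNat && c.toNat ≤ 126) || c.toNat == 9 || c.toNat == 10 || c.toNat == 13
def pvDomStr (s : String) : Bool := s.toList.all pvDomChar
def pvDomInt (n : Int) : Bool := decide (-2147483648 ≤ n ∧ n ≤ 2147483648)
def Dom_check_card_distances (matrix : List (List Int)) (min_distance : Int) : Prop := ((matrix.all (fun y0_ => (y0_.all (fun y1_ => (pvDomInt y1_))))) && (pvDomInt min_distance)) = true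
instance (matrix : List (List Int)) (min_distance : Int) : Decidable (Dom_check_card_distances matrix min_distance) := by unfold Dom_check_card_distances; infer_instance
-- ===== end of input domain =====

-- B replaces A's all-pairs scans by sorting: adjacent-gap checks per sorted row, and one
-- value-sorted (value, row_index) list whose adjacent cross-tag gaps decide the cross-row check.

-- ===== PORT A =====
def check_row_internal_distance (row : List Int) (min_distance : Int) : Bool :=
  if min_distance ≤ 0 then true
  else
    (PySem.List.pyRange 0 (PySem.List.len row) 1).all (fun i =>
      (PySem.List.pyRange (i + 1) (PySem.List.len row) 1).all (fun j =>
        !decide (|PySem.List.pyGetD row i 0 - PySem.List.pyGetD row j 0| < min_distance)))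

def check_inter_row_distances (matrix : List (List Int)) (min_distance : Int) : Bool :=
  if min_distance ≤ 0 then true
  else
    (PySem.List.pyRange 0 (PySem.List.len matrix) 1).all (fun r1 =>
      (PySem.List.pyRange (r1 + 1) (PySem.List.len matrix) 1).all (fun r2 =>
        (PySem.List.pyGetD matrix r1 []).all (fun n1 =>
          (PySem.List.pyGetD matrix r2 []).all (fun n2 =>
            !decide (|n1 - n2| < min_distance)))))

def check_card_distances (matrix : List (List Int)) (min_distance : Int) : Bool × Int :=
  if min_distance ≤ 0 then (true, 0)
  else
    let violations : Int :=
      matrix.foldl (fun v row => if !check_row_internal_distance row min_distance then v + 1 else v) 0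
    let violations : Int :=
      if !check_inter_row_distances matrix min_distance then violations + 1 else violations
    (violations == 0, violations)

-- ===== PORT B =====
-- `zip(s, s[1:])` is ported as `s.zip s.tail` (s[1:] = drop 1 = tail; exact).
def rowSortedViolation (row : List Int) (min_distance : Int) : Bool :=
  let s := PySem.List.sorted row (fun x => x)
  (s.zip s.tail).any (fun p => decide (p.2 - p.1 < min_distance))

def taggedValues (matrix : List (List Int)) : List (Int × Int) :=
  (PySem.List.enumerate matrix).flatMap (fun p => p.2.map (fun v => (v, p.1)))

def interSortedViolation (matrix : List (List Int)) (min_distance : Int) : Bool :=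
  let t := PySem.List.sorted (taggedValues matrix) (fun p => p.1)
  (t.zip t.tail).any (fun p => decide (p.2.2 ≠ p.1.2) && decide (p.2.1 - p.1.1 < min_distance))

def check_card_distances_alt (matrix : List (List Int)) (min_distance : Int) : Bool × Int :=
  if min_distance ≤ 0 then (true, 0)
  else
    let violations : Int :=
      matrix.foldl (fun v row => if rowSortedViolation row min_distance then v + 1 else v) 0
    let violations : Int :=
      if interSortedViolation matrix min_distance then violations + 1 else violations
    (violations == 0, violations)

-- ===== PRECONDITION & SPEC =====
def Spec_check_card_distances (matrix : List (List Int)) (min_distance : Int) (out : Bool × Int) : Prop := out = check_card_distances_alt matrix min_distance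
instance (matrix : List (List Int)) (min_distance : Int) (out : Bool × Int) : Decidable (Spec_check_card_distances matrix min_distance out) := by unfold Spec_check_card_distances; infer_instance

-- ===== CLAIM (what is proved, stated in full; the proofs are below) =====
def Claim_equal_check_card_distances : Prop := ∀ (matrix : List (List Int)) (min_distance : Int), Dom_check_card_distances matrix min_distance → Spec_check_card_distances matrix min_distance (check_card_distances matrix min_distance)

-- ===== LEMMAS AND PROOFS =====

-- Pairwise can be rewritten pointwise under a Pairwise side condition.
theorem pairwise_congr_of_pairwise {α : Type} {S R R' : α → α → Prop} {l : List α}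
    (hS : l.Pairwise S) (h : ∀ a b, S a b → (R a b ↔ R' a b)) :
    l.Pairwise R ↔ l.Pairwise R' := by
  induction l with
  | nil => simp
  | cons a t ih =>
    rw [List.pairwise_cons] at hS
    rw [List.pairwise_cons, List.pairwise_cons, ih hS.2]
    exact and_congr (forall₂_congr fun b hb => h a b (hS.1 b hb)) Iff.rfl

-- In a value-sorted list, no adjacent gap below d ↔ no gap below d at all.
theorem adj_intra_iff {d : Int} (s : List Int)
    (hs : s.Pairwise (· ≤ ·)) :
    ((s.zip s.tail).any (fun p => decide (p.2 - p.1 < d)) = false) ↔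
      s.Pairwise (fun a b => ¬(|a - b| < d)) := by
  induction s with
  | nil => simp
  | cons a t ih =>
    rw [List.pairwise_cons] at hs
    cases t with
    | nil => simp
    | cons b t' =>
      have hsort := List.pairwise_cons.mp hs.2
      have ih' := ih hs.2
      simp only [List.tail_cons] at ih' ⊢
      rw [List.zip_cons_cons, List.any_cons, Bool.or_eq_false_iff, ih',
        List.pairwise_cons (l := b :: t'), decide_eq_false_iff_not, not_lt]
      constructor
      · rintro ⟨hab, hP⟩
        refine ⟨fun x hx => ?_, hP⟩
        have hax : a ≤ x := hs.1 x hx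
        have hbx : b ≤ x := by
          rcases List.mem_cons.mp hx with h | h
          · omega
          · exact hsort.1 x h
        rw [abs_sub_comm, abs_of_nonneg (by omega)]
        omega
      · rintro ⟨hall, hP⟩
        refine ⟨?_, hP⟩
        have := hall b (List.mem_cons_self ..)
        have hab : a ≤ b := hs.1 b (List.mem_cons_self ..)
        rw [abs_sub_comm, abs_of_nonneg (by omega)] at this
        omega

-- In a value-sorted tagged list, no adjacent cross-tag gap below d ↔ no cross-tag gap below d at all.
theorem adj_inter_iff {d : Int} (s : List (Int × Int))
    (hs : s.Pairwise (fun p q => p.1 ≤ q.1)) :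
    ((s.zip s.tail).any (fun p => decide (p.2.2 ≠ p.1.2) && decide (p.2.1 - p.1.1 < d)) = false) ↔
      s.Pairwise (fun p q => p.2 = q.2 ∨ ¬(|p.1 - q.1| < d)) := by
  induction s with
  | nil => simp
  | cons a t ih =>
    rw [List.pairwise_cons] at hs
    cases t with
    | nil => simp
    | cons b t' =>
      have hsort := List.pairwise_cons.mp hs.2
      have ih' := ih hs.2
      simp only [List.tail_cons] at ih' ⊢
      rw [List.zip_cons_cons, List.any_cons, Bool.or_eq_false_iff, ih',
        List.pairwise_cons (l := b :: t')]
      simp only [Bool.and_eq_false_iff, decide_eq_false_iff_not, not_not, not_lt]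
      constructor
      · rintro ⟨hab, hP⟩
        have hPb := (List.pairwise_cons.mp hP).1
        refine ⟨fun x hx => ?_, hP⟩
        by_cases htag : a.2 = x.2
        · exact Or.inl htag
        right
        have hax : a.1 ≤ x.1 := hs.1 x hx
        rw [abs_sub_comm, abs_of_nonneg (by omega)]
        rcases hab with hab | hab
        · -- a and b share a tag; x must be deeper in the list
          have hxb : x ≠ b := fun h => htag (by rw [h, ← hab])
          have hx' : x ∈ t' := by
            rcases List.mem_cons.mp hx with h | h
            · exact absurd h hxb
            · exact h
          rcases hPb x hx' with h | h
          · exact absurd (hab.symm.trans h) htag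
          · have hbx : b.1 ≤ x.1 := hsort.1 x hx'
            rw [abs_sub_comm, abs_of_nonneg (by omega)] at h
            have hab1 : a.1 ≤ b.1 := hs.1 b (List.mem_cons_self ..)
            omega
        · have hbx : b.1 ≤ x.1 := by
            rcases List.mem_cons.mp hx with hh | hh
            · rw [hh]
            · exact hsort.1 x hh
          omega
      · rintro ⟨hall, hP⟩
        refine ⟨?_, hP⟩
        rcases hall b (List.mem_cons_self ..) with h | h
        · exact Or.inl h.symm
        · right
          have hab : a.1 ≤ b.1 := hs.1 b (List.mem_cons_self ..)
          rw [abs_sub_comm, abs_of_nonneg (by omega)] at h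
          omega

-- A's row check counts exactly the pairwise-distance property.
theorem rowA_iff (row : List Int) {d : Int} (hd : 0 < d) :
    check_row_internal_distance row d = true ↔
      row.Pairwise (fun a b => ¬(|a - b| < d)) := by
  rw [check_row_internal_distance, if_neg (by omega)]
  simp only [List.all_eq_true, PySem.List.mem_pyRange_one, PySem.List.len_eq,
    Bool.not_eq_eq_eq_not, Bool.not_true, decide_eq_false_iff_not, and_imp]
  rw [List.pairwise_iff_getElem]
  constructor
  · intro h i j hi hj hij
    have := h (i : Int) (by omega) (by omega) (j : Int) (by omega) (by omega)
    rw [PySem.List.pyGetD_eq_getElem row 0 (by omega) (by omega),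
      PySem.List.pyGetD_eq_getElem row 0 (by omega) (by omega)] at this
    simpa using this
  · intro h i hi0 hi j hij hj
    have hi' : i.toNat < row.length := by omega
    have hj' : j.toNat < row.length := by omega
    rw [PySem.List.pyGetD_eq_getElem row 0 hi0 (by omega),
      PySem.List.pyGetD_eq_getElem row 0 (by omega) (by omega)]
    exact h i.toNat j.toNat hi' hj' (by omega)

-- A's inter-row check counts exactly the row-pairwise-distance property.
theorem interA_iff (matrix : List (List Int)) {d : Int} (hd : 0 < d) :
    check_inter_row_distances matrix d = true ↔
      matrix.Pairwise (fun r1 r2 => ∀ x ∈ r1, ∀ y ∈ r2, ¬(|x - y| < d)) := by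
  rw [check_inter_row_distances, if_neg (by omega)]
  simp only [List.all_eq_true, PySem.List.mem_pyRange_one, PySem.List.len_eq,
    Bool.not_eq_eq_eq_not, Bool.not_true, decide_eq_false_iff_not, and_imp]
  rw [List.pairwise_iff_getElem]
  constructor
  · intro h i j hi hj hij x hx y hy
    have := h (i : Int) (by omega) (by omega) (j : Int) (by omega) (by omega)
    rw [PySem.List.pyGetD_eq_getElem matrix [] (by omega) (by omega),
      PySem.List.pyGetD_eq_getElem matrix [] (by omega) (by omega)] at this
    simpa using this x hx y hy
  · intro h i hi0 hi j hij hj x hx y hy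
    have hi' : i.toNat < matrix.length := by omega
    have hj' : j.toNat < matrix.length := by omega
    rw [PySem.List.pyGetD_eq_getElem matrix [] hi0 (by omega)] at hx
    rw [PySem.List.pyGetD_eq_getElem matrix [] (by omega) (by omega)] at hy
    exact h i.toNat j.toNat hi' hj' (by omega) x hx y hy

-- The two row checks agree (A is true exactly when B sees no sorted-adjacent gap).
theorem row_eq (row : List Int) {d : Int} (hd : 0 < d) :
    check_row_internal_distance row d = !rowSortedViolation row d := by
  have hperm := PySem.List.sorted_perm row (fun x => x) false
  have hiff : check_row_internal_distance row d = true ↔ rowSortedViolation row d = false := by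
    rw [rowA_iff row hd, rowSortedViolation,
      adj_intra_iff _ (by simpa using PySem.List.sorted_pairwise row (fun x => x))]
    exact (hperm.pairwise_iff (fun {x y} h => by rwa [abs_sub_comm])).symm
  cases hA : check_row_internal_distance row d <;> cases hB : rowSortedViolation row d <;> simp_all

-- Pairwise over the tagged flattened list is exactly A's row-pairwise property.
theorem tagged_pairwise_iff (matrix : List (List Int)) {d : Int} :
    (taggedValues matrix).Pairwise (fun p q => p.2 = q.2 ∨ ¬(|p.1 - q.1| < d)) ↔
      matrix.Pairwise (fun r1 r2 => ∀ x ∈ r1, ∀ y ∈ r2, ¬(|x - y| < d)) := by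
  rw [taggedValues]
  refine (List.pairwise_flatMap).trans ?_
  have htriv : ∀ p ∈ PySem.List.enumerate matrix,
      (p.2.map (fun v => (v, p.1))).Pairwise
        (fun p q => p.2 = q.2 ∨ ¬(|p.1 - q.1| < d)) := by
    intro p _
    rw [List.pairwise_map]
    exact List.pairwise_of_forall_sublist (fun {a b} _ => Or.inl rfl)
  rw [iff_true_intro htriv, true_and]
  refine (pairwise_congr_of_pairwise (PySem.List.pairwise_lt_enumerate matrix 0)
    (R' := fun p q => ∀ x ∈ p.2, ∀ y ∈ q.2, ¬(|x - y| < d)) ?_).trans ?_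
  · intro p q hpq
    simp [hpq.ne]
  · refine (List.pairwise_map (f := fun x : Int × List Int => x.2)
      (R := fun r1 r2 => ∀ x ∈ r1, ∀ y ∈ r2, ¬(|x - y| < d))).symm.trans ?_
    rw [PySem.List.map_snd_enumerate]

-- The two inter-row checks agree.
theorem inter_eq (matrix : List (List Int)) {d : Int} (hd : 0 < d) :
    check_inter_row_distances matrix d = !interSortedViolation matrix d := by
  have hperm := PySem.List.sorted_perm (taggedValues matrix) (fun p => p.1) false
  have hiff : check_inter_row_distances matrix d = true ↔ interSortedViolation matrix d = false := by
    rw [interA_iff matrix hd, interSortedViolation,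
      adj_inter_iff _ (PySem.List.sorted_pairwise (taggedValues matrix) (fun p => p.1)),
      hperm.pairwise_iff (fun {x y} h => by
        rcases h with h | h
        · exact Or.inl h.symm
        · exact Or.inr (by rwa [abs_sub_comm])),
      tagged_pairwise_iff matrix]
  cases hA : check_inter_row_distances matrix d <;> cases hB : interSortedViolation matrix d <;> simp_all

-- ===== VERDICT (by name: the statement is the Claim_ definition above) =====
theorem check_card_distances_spec : Claim_equal_check_card_distances := by
  intro matrix d _
  unfold Spec_check_card_distances check_card_distances check_card_distances_alt
  by_cases hd : d ≤ 0
  · rw [if_pos hd, if_pos hd]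
  · rw [if_neg hd, if_neg hd]
    have hd' : 0 < d := by omega
    have hfold : (fun (v : Int) row => if !check_row_internal_distance row d then v + 1 else v) =
        (fun (v : Int) row => if rowSortedViolation row d then v + 1 else v) := by
      funext v row
      rw [row_eq row hd']
      cases rowSortedViolation row d <;> simp
    rw [hfold, inter_eq matrix hd']
    cases interSortedViolation matrix d <;> simp
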